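-- pv_equiv track=rewrite | github.com/RealKleiner/aoc2021 | 7/sol.py | part_one
-- ===== SOURCE A (Python) =====
-- import math
--
-- def get_endpoints(data: dict) -> tuple:
--     return min(data.keys()), max(data.keys())
--
-- def part_one(data: dict) -> int:
--     start, end = get_endpoints(data)
--     fuel = math.inf
--
--     for pos in range(start, end + 1):
--         _fuel = 0
--         for key, value in data.items():
--             _fuel += abs(key - pos) * value
--
--         if _fuel < fuel:
--             fuel = _fuel
--
--     return fuel
-- ===== SOURCE B (Python) =====
-- def part_one(data: dict) -> int:
--     start, end = min(data), max(data)
--     total = sum(data.values())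
--     cur = sum((k - start) * w for k, w in data.items())
--     best = cur
--     wleft = 0
--     for pos in range(start, end):
--         wleft += data.get(pos, 0)
--         cur += 2 * wleft - total
--         if cur < best:
--             best = cur
--     return best
-- ===== Notes on version B (the rewrite author's own statement) =====
-- stated objective: faster
-- what changed: Replaces the O(range*n) double loop (recomputing the full weighted-distance sum at every candidate position) by one O(range+n) sweep that updates the cost incrementally via the prefix-weight recurrence cost(p+1) = cost(p) + 2*W_left(p) - W_total.
import Mathlib
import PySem

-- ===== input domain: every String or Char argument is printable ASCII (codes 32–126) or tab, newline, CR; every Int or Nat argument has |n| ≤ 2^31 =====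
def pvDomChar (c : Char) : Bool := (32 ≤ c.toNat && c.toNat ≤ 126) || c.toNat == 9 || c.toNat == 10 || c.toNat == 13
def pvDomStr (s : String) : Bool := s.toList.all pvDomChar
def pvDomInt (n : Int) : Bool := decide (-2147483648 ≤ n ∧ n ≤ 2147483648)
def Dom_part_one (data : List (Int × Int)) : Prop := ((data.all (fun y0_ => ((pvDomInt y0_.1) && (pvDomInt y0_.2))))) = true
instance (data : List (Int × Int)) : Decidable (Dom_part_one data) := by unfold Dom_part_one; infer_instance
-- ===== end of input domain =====

-- B replaces A's O(range*n) double loop by one O(range+n) incremental sweep (asymptotically faster).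

-- ===== PORT A =====
-- abs(x) on ints
def pyAbs (x : Int) : Int := if x < 0 then -x else x

def part_one (data : List (Int × Int)) : Int :=
  -- start, end = min(data.keys()), max(data.keys())  (raises ValueError on empty dict → Pre_)
  match PySem.List.min? (data.map Prod.fst) (fun x => x),
        PySem.List.max? (data.map Prod.fst) (fun x => x) with
  | some s, some e =>
      -- fuel = math.inf modelled as `none`; under Pre_ the range is nonempty so the result is an int
      ((PySem.List.pyRange s (e + 1) 1).foldl
        (fun (fuel : Option Int) pos =>
          let f := data.foldl (fun acc kv => acc + pyAbs (kv.1 - pos) * kv.2) 0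
          match fuel with
          | none => some f
          | some g => if f < g then some f else some g)
        none).getD 0
  | _, _ => 0   -- unreachable under Pre_ (Python raises ValueError)

-- ===== PORT B =====
-- data.get(pos, 0)
def getW (data : List (Int × Int)) (pos : Int) : Int :=
  match data.find? (fun kv => kv.1 == pos) with
  | some kv => kv.2
  | none => 0

def part_one_alt (data : List (Int × Int)) : Int :=
  match PySem.List.min? (data.map Prod.fst) (fun x => x) with
  | none => 0   -- unreachable under Pre_ (Python raises ValueError)
  | some s =>
    match PySem.List.max? (data.map Prod.fst) (fun x => x) with
    | none => 0
    | some e =>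
      let total := data.foldl (fun a kv => a + kv.2) 0
      let cur0 := data.foldl (fun a kv => a + (kv.1 - s) * kv.2) 0
      -- state (wleft, cur, best)
      ((PySem.List.pyRange s e 1).foldl
        (fun (st : Int × Int × Int) pos =>
          let wleft := st.1 + getW data pos
          let cur := st.2.1 + (2 * wleft - total)
          (wleft, cur, if cur < st.2.2 then cur else st.2.2))
        (0, cur0, cur0)).2.2

-- ===== PRECONDITION & SPEC =====
-- Pre_ excludes the empty dict (Python's min() raises ValueError) and association lists with
-- duplicate keys, which are not encodings of any Python dict (A's argument is a dict).
def Pre_part_one (data : List (Int × Int)) : Prop :=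
  data ≠ [] ∧ (data.map Prod.fst).Nodup
instance (data : List (Int × Int)) : Decidable (Pre_part_one data) := by
  unfold Pre_part_one; infer_instance

def pvWitness_part_one : (List (Int × Int)) := [(1, 2), (4, 1)]

def Spec_part_one (data : List (Int × Int)) (out : Int) : Prop := out = part_one_alt data
instance (data : List (Int × Int)) (out : Int) : Decidable (Spec_part_one data out) := by
  unfold Spec_part_one; infer_instance

-- ===== CLAIM (what is proved, stated in full; the proofs are below) =====
def Claim_equal_part_one : Prop :=
  ∀ (data : List (Int × Int)), Dom_part_one data → Pre_part_one data →
    Spec_part_one data (part_one data)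

-- ===== LEMMAS AND PROOFS =====

-- cost(p) = sum |k - p| * w, the quantity A minimises
def cost (data : List (Int × Int)) (p : Int) : Int :=
  (data.map (fun kv => pyAbs (kv.1 - p) * kv.2)).sum

def wsum (data : List (Int × Int)) : Int := (data.map (fun kv => kv.2)).sum

-- total weight of keys ≤ p
def wle (data : List (Int × Int)) (p : Int) : Int :=
  (data.map (fun kv => if kv.1 ≤ p then kv.2 else 0)).sum

def mfold (data : List (Int × Int)) (l : List Int) (a : Int) : Int :=
  l.foldl (fun b p => min b (cost data p)) a

theorem foldl_add_map (f : Int × Int → Int) (data : List (Int × Int)) (acc : Int) :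
    data.foldl (fun a kv => a + f kv) acc = acc + (data.map f).sum := by
  induction data generalizing acc with
  | nil => simp
  | cons kv l ih => simp [ih]; ring

theorem pyAbs_step (k p : Int) :
    pyAbs (k - (p + 1)) = pyAbs (k - p) + (if k ≤ p then 1 else -1) := by
  simp only [pyAbs]; split_ifs <;> omega

theorem cost_step (data : List (Int × Int)) (p : Int) :
    cost data (p + 1) = cost data p + (2 * wle data p - wsum data) := by
  induction data with
  | nil => simp [cost, wle, wsum]
  | cons kv l ih =>
      simp only [cost, wle, wsum, List.map_cons, List.sum_cons] at *
      rw [pyAbs_step]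
      split_ifs <;> [skip; skip] <;> nlinarith [ih]

theorem sum_zero_of_not_mem (l : List (Int × Int)) (q : Int)
    (h : q ∉ l.map Prod.fst) :
    (l.map (fun kv => if kv.1 = q then kv.2 else 0)).sum = 0 := by
  induction l with
  | nil => simp
  | cons kv t ih =>
      simp only [List.map_cons, List.mem_cons, not_or] at h
      have hne : ¬ kv.1 = q := fun hc => h.1 hc.symm
      simp [List.sum_cons, if_neg hne, ih h.2]

theorem getW_eq_sum (data : List (Int × Int)) (q : Int)
    (hnd : (data.map Prod.fst).Nodup) :
    getW data q = (data.map (fun kv => if kv.1 = q then kv.2 else 0)).sum := by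
  induction data with
  | nil => simp [getW]
  | cons kv l ih =>
      simp only [List.map_cons, List.nodup_cons] at hnd
      by_cases hq : kv.1 = q
      · subst hq
        simp [getW, List.find?, sum_zero_of_not_mem l kv.1 hnd.1]
      · have : (kv.1 == q) = false := by simp [hq]
        simp only [getW, List.find?, this, List.map_cons, List.sum_cons, if_neg hq,
          zero_add]
        exact ih hnd.2

theorem wle_step (data : List (Int × Int)) (q : Int)
    (hnd : (data.map Prod.fst).Nodup) :
    wle data q = wle data (q - 1) + getW data q := by
  rw [getW_eq_sum data q hnd]
  induction data with
  | nil => simp [wle]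
  | cons kv l ih =>
      simp only [List.nodup_cons, List.map_cons] at hnd
      simp only [wle, List.map_cons, List.sum_cons] at *
      have := ih hnd.2
      split_ifs <;> omega

theorem wle_base (data : List (Int × Int)) (s : Int)
    (hs : ∀ k ∈ data.map Prod.fst, s ≤ k) :
    wle data (s - 1) = 0 := by
  induction data with
  | nil => simp [wle]
  | cons kv l ih =>
      simp only [List.map_cons, List.mem_cons, forall_eq_or_imp] at hs
      simp only [wle, List.map_cons, List.sum_cons] at *
      rw [if_neg (by omega), ih hs.2]; omega

theorem cur0_eq_cost (data : List (Int × Int)) (s : Int)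
    (hs : ∀ k ∈ data.map Prod.fst, s ≤ k) :
    data.foldl (fun a kv => a + (kv.1 - s) * kv.2) 0 = cost data s := by
  rw [foldl_add_map]
  simp only [cost, zero_add]
  congr 1
  apply List.map_congr_left
  intro kv hkv
  have : s ≤ kv.1 := hs kv.1 (List.mem_map_of_mem hkv)
  simp [pyAbs]; omega

-- A's loop computes a running minimum of cost
theorem foldA_some (data : List (Int × Int)) (l : List Int) (acc : Int) :
    (l.foldl
      (fun (fuel : Option Int) pos =>
        let f := data.foldl (fun a kv => a + pyAbs (kv.1 - pos) * kv.2) 0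
        match fuel with
        | none => some f
        | some g => if f < g then some f else some g)
      (some acc)) = some (mfold data l acc) := by
  induction l generalizing acc with
  | nil => simp [mfold]
  | cons x t ih =>
      simp only [List.foldl_cons, mfold] at *
      rw [show (data.foldl (fun a kv => a + pyAbs (kv.1 - x) * kv.2) 0) = cost data x by
            rw [foldl_add_map]; simp [cost]]
      rw [show (if cost data x < acc then some (cost data x) else some acc)
            = some (min acc (cost data x)) by split_ifs <;> simp <;> omega]
      exact ih _

-- B's sweep invariant
theorem foldB_inv (data : List (Int × Int)) (s : Int)
    (hnd : (data.map Prod.fst).Nodup)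
    (hs : ∀ k ∈ data.map Prod.fst, s ≤ k) (n : Nat) :
    ((PySem.List.pyRange s (s + n) 1).foldl
      (fun (st : Int × Int × Int) pos =>
        let wleft := st.1 + getW data pos
        let cur := st.2.1 + (2 * wleft - wsum data)
        (wleft, cur, if cur < st.2.2 then cur else st.2.2))
      (0, cost data s, cost data s))
    = (wle data (s + n - 1), cost data (s + n),
       mfold data (PySem.List.pyRange (s + 1) (s + n + 1) 1) (cost data s)) := by
  induction n with
  | zero =>
      simp [PySem.List.pyRange_one_eq_nil, mfold, wle_base data s hs]
  | succ n ih =>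
      have h1 : s ≤ s + (n : Int) := by omega
      have hx : s + ((n + 1 : Nat) : Int) = (s + (n : Int)) + 1 := by push_cast; ring
      rw [hx, PySem.List.pyRange_one_succ_right h1, List.foldl_append, ih]
      simp only [List.foldl_cons, List.foldl_nil]
      have hw : wle data (s + n - 1) + getW data (s + n) = wle data (s + n) := by
        rw [wle_step data (s + n) hnd]
      have hc : cost data (s + n) + (2 * wle data (s + n) - wsum data)
          = cost data (s + n + 1) := by rw [cost_step]
      have h2 : (s : Int) + 1 ≤ s + n + 1 := by omega
      rw [PySem.List.pyRange_one_succ_right h2 (a := s + 1)]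
      simp only [mfold, List.foldl_append, List.foldl_cons, List.foldl_nil, hw, hc]
      have e1 : s + (n : Int) + 1 - 1 = s + n := by ring
      rw [e1]
      refine Prod.ext rfl (Prod.ext rfl ?_)
      split_ifs with h
      · rw [min_eq_right (by omega)]
      · rw [min_eq_left (by omega)]

-- ===== VERDICT (by name: the statement is the Claim_ definition above) =====
theorem part_one_spec : Claim_equal_part_one := by
  intro data _ hpre
  obtain ⟨hne, hnd⟩ := hpre
  have hks : data.map Prod.fst ≠ [] := by simpa using hne
  unfold Spec_part_one part_one part_one_alt
  obtain ⟨s, hsmin⟩ : ∃ s, PySem.List.min? (data.map Prod.fst) (fun x => x) = some s := by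
    cases h : PySem.List.min? (data.map Prod.fst) (fun x => x) with
    | none => exact absurd ((PySem.List.min?_eq_none_iff _ _).mp h) hks
    | some s => exact ⟨s, rfl⟩
  obtain ⟨e, hemax⟩ : ∃ e, PySem.List.max? (data.map Prod.fst) (fun x => x) = some e := by
    cases h : PySem.List.max? (data.map Prod.fst) (fun x => x) with
    | none => exact absurd ((PySem.List.max?_eq_none_iff _ _).mp h) hks
    | some e => exact ⟨e, rfl⟩
  rw [hsmin, hemax]
  dsimp only
  have hs : ∀ k ∈ data.map Prod.fst, s ≤ k := fun k hk =>
    PySem.List.min?_isMin hsmin k hk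
  have hse : s ≤ e := by
    have hmem := PySem.List.min?_mem hsmin
    exact PySem.List.max?_isMax hemax s hmem
  have hn : e = s + ((e - s).toNat : Int) := by omega
  -- A side
  rw [show PySem.List.pyRange s (e + 1) 1 = s :: PySem.List.pyRange (s + 1) (e + 1) 1 from
      PySem.List.pyRange_one_cons (by omega)]
  simp only [List.foldl_cons]
  rw [show (data.foldl (fun a kv => a + pyAbs (kv.1 - s) * kv.2) 0) = cost data s by
        rw [foldl_add_map]; simp [cost]]
  rw [foldA_some]
  -- B side
  rw [show (data.foldl (fun a kv => a + kv.2) 0) = wsum data by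
        rw [foldl_add_map]; simp [wsum]]
  rw [cur0_eq_cost data s hs]
  rw [hn, foldB_inv data s hnd hs]
  simp
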